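-- pv_equiv track=rewrite | github.com/waratecs123/Translater-Apps | Action-On-Ip-Addresses/ip_address_checker/ip_address_checker.py | net_id_host_id
-- ===== SOURCE A (Python) =====
-- MIN_IP_LENGTH = 7
--
-- MAX_IP_LENGTH = 15
--
-- OCTET_COUNT = 4
--
-- MAX_OCTET_VALUE = 255
--
-- MIN_OCTET_VALUE = 0
--
-- def is_valid_ip_address(ip_address: str) -> bool:
--     try:
--         if len(ip_address) < MIN_IP_LENGTH or len(ip_address) > MAX_IP_LENGTH:
--             return False
--         else:
--             x_1 = ip_address.split(".")
--             if len(x_1) == OCTET_COUNT: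
--                 for i in x_1:
--                     if int(i) < MIN_OCTET_VALUE or int(i) > MAX_OCTET_VALUE:
--                         return False
--                 return True
--     except ValueError:
--         return False
--
-- def class_ip_address(ip_address: str) -> str:
--     if not is_valid_ip_address(ip_address):
--         return "Неверный формат IP-адреса!"
--
--     try:
--         x_1 = ip_address.split(".")
--         y = int(x_1[0])
--         if 1 <= y <= 126:
--             return "A"
--         elif 128 <= y <= 191:
--             return "B"
--         elif 192 <= y <= 223:
--             return "C"
--         elif 224 <= y <= 239:
--             return "D"
--         elif 240 <= y <= 255:
--             return "E"
--         else:
--             return "Неопределенный класс"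
--     except Exception as e:
--         return f"Неизвеастная ошибка - {e}"
--
-- def default_mask(ip_address: str) -> str:
--     if not is_valid_ip_address(ip_address):
--         return "Неверный формат IP-адреса!"
--
--     try:
--         class_ip_adr = class_ip_address(ip_address)
--         if class_ip_adr == "A":
--             return "255.0.0.0"
--         elif class_ip_adr == "B":
--             return "255.255.0.0"
--         elif class_ip_adr == "C":
--             return "255.255.255.0"
--         elif class_ip_adr == "D":
--             return "Не имеет маски по умолчанию"
--         elif class_ip_adr == "E":
--             return "Не имеет маски по умолчанию"
--         else:
--             return "Неопределенная маска - класс не найден"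
--     except Exception as e:
--         return f"Неизвеастная ошибка - {e}"
--
-- def net_id_host_id(ip_address: str) -> str:
--     if not is_valid_ip_address(ip_address):
--         return "Неверный формат IP-адреса!"
--
--     try:
--         mask = default_mask(ip_address)
--         if not is_valid_ip_address(mask):
--             return "Не имеет маски по умолчанию"
--         mask_octets = mask.split(".")
--         template = []
--         for octet in mask_octets:
--             if octet == "255":
--                 template.append("N")
--             elif octet == "0":
--                 template.append("H")
--             else:
--                 template.append("X")
--         return ".".join(template)
--     except Exception as e:
--         return f"Неизвестная ошибка - {e}"
-- ===== SOURCE B (Python) =====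
-- MIN_IP_LENGTH = 7
-- MAX_IP_LENGTH = 15
-- OCTET_COUNT = 4
-- MAX_OCTET_VALUE = 255
-- MIN_OCTET_VALUE = 0
--
-- def is_valid_ip_address(ip_address: str) -> bool:
--     if not (MIN_IP_LENGTH <= len(ip_address) <= MAX_IP_LENGTH):
--         return False
--     octets = ip_address.split(".")
--     if len(octets) != OCTET_COUNT:
--         return False
--     try:
--         return all(MIN_OCTET_VALUE <= int(o) <= MAX_OCTET_VALUE for o in octets)
--     except ValueError:
--         return False
--
-- def net_id_host_id(ip_address: str) -> str:
--     if not is_valid_ip_address(ip_address):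
--         return "Неверный формат IP-адреса!"
--     y = int(ip_address.split(".")[0])
--     if 1 <= y <= 126:
--         return "N.H.H.H"
--     if 128 <= y <= 191:
--         return "N.N.H.H"
--     if 192 <= y <= 223:
--         return "N.N.N.H"
--     return "Не имеет маски по умолчанию"
-- ===== Notes on version B (the rewrite author's own statement) =====
-- stated objective: simpler
-- what changed: B drops the class_ip_address/default_mask chain and the octet-mapping loop over the mask string: it branches on the parsed first octet directly and returns the N/H template as a closed-form literal.
import Mathlib
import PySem

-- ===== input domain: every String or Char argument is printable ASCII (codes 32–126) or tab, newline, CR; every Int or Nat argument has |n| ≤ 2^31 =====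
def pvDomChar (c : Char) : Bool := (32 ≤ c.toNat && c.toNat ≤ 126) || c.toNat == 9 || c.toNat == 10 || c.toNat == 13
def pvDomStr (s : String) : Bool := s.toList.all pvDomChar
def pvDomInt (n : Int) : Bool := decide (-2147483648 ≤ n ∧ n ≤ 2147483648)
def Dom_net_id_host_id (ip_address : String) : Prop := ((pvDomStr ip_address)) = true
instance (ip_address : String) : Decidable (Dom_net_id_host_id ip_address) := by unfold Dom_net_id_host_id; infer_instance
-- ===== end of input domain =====

-- B replaces A's class→mask→template chain and its octet-mapping loop by a direct branch on the
-- parsed first octet that returns the template literal (objective: simpler).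


-- ===== PORT A =====
-- Python's is_valid_ip_address returns None (falsy) when the split has ≠ 4 parts; it is only
-- ever used in boolean position, so the port returns false there.
-- Strings are handled on the List Char side (PySem.Chars/PySem.Int.ofChars?), exact on ASCII.
def is_valid_ip_address (ip_address : String) : Bool :=
  if PySem.Str.len ip_address < 7 ∨ PySem.Str.len ip_address > 15 then false
  else
    -- x_1 = ip_address.split("."): the split expression is pure, so it is repeated instead of let-bound
    if (PySem.Chars.splitOn ip_address.toList ['.']).length = 4 then
      -- for-loop with early 'return False'; a ValueError from int() is caught and yields False
      (PySem.Chars.splitOn ip_address.toList ['.']).all (fun i =>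
        match PySem.Int.ofChars? i with
        | some v => !(decide (v < 0) || decide (v > 255))
        | none => false)
    else false

def class_ip_address (ip_address : String) : String :=
  if ¬ is_valid_ip_address ip_address then "Неверный формат IP-адреса!"
  else
    match PySem.List.pyGet? (PySem.Chars.splitOn ip_address.toList ['.']) 0 with
    | none => "Неизвеастная ошибка - "   -- unreachable: split(".") is never empty
    | some s =>
      match PySem.Int.ofChars? s with
      | none => "Неизвеастная ошибка - " -- unreachable: the validity guard makes int() succeed
      | some y =>
        if 1 ≤ y ∧ y ≤ 126 then "A"
        else if 128 ≤ y ∧ y ≤ 191 then "B"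
        else if 192 ≤ y ∧ y ≤ 223 then "C"
        else if 224 ≤ y ∧ y ≤ 239 then "D"
        else if 240 ≤ y ∧ y ≤ 255 then "E"
        else "Неопределенный класс"

def default_mask (ip_address : String) : String :=
  if ¬ is_valid_ip_address ip_address then "Неверный формат IP-адреса!"
  else
    if class_ip_address ip_address = "A" then "255.0.0.0"
    else if class_ip_address ip_address = "B" then "255.255.0.0"
    else if class_ip_address ip_address = "C" then "255.255.255.0"
    else if class_ip_address ip_address = "D" then "Не имеет маски по умолчанию"
    else if class_ip_address ip_address = "E" then "Не имеет маски по умолчанию"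
    else "Неопределенная маска - класс не найден"

def net_id_host_id (ip_address : String) : String :=
  if ¬ is_valid_ip_address ip_address then "Неверный формат IP-адреса!"
  else
    -- mask = default_mask(ip_address): pure, repeated instead of let-bound
    if ¬ is_valid_ip_address (default_mask ip_address) then "Не имеет маски по умолчанию"
    else
      PySem.Str.join "."
        ((PySem.Chars.splitOn (default_mask ip_address).toList ['.']).foldl (fun acc octet =>
          acc ++ [if octet = ['2','5','5'] then "N" else if octet = ['0'] then "H" else "X"]) [])

-- ===== PORT B =====
def is_valid_ip_address_b (ip_address : String) : Bool :=
  if ¬ (7 ≤ PySem.Str.len ip_address ∧ PySem.Str.len ip_address ≤ 15) then false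
  else
    -- octets = ip_address.split("."): pure, repeated instead of let-bound
    if (PySem.Chars.splitOn ip_address.toList ['.']).length ≠ 4 then false
    else
      -- all(...) over int(o); a ValueError inside all() is caught and yields False
      (PySem.Chars.splitOn ip_address.toList ['.']).all (fun o =>
        match PySem.Int.ofChars? o with
        | some v => decide (0 ≤ v ∧ v ≤ 255)
        | none => false)

def net_id_host_id_alt (ip_address : String) : String :=
  if ¬ is_valid_ip_address_b ip_address then "Неверный формат IP-адреса!"
  else
    match PySem.List.pyGet? (PySem.Chars.splitOn ip_address.toList ['.']) 0 with
    | none => ""   -- unreachable: split(".") is never empty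
    | some s =>
      match PySem.Int.ofChars? s with
      | none => "" -- unreachable: the validity guard makes int() succeed
      | some y =>
        if 1 ≤ y ∧ y ≤ 126 then "N.H.H.H"
        else if 128 ≤ y ∧ y ≤ 191 then "N.N.H.H"
        else if 192 ≤ y ∧ y ≤ 223 then "N.N.N.H"
        else "Не имеет маски по умолчанию"

-- ===== PRECONDITION & SPEC =====
def Spec_net_id_host_id (ip_address : String) (out : String) : Prop := out = net_id_host_id_alt ip_address
instance (ip_address : String) (out : String) : Decidable (Spec_net_id_host_id ip_address out) := by unfold Spec_net_id_host_id; infer_instance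

-- ===== CLAIM (what is proved, stated in full; the proofs are below) =====
def Claim_equal_net_id_host_id : Prop := ∀ (ip_address : String), Dom_net_id_host_id ip_address → Spec_net_id_host_id ip_address (net_id_host_id ip_address)

-- ===== LEMMAS AND PROOFS =====

theorem valid_eq (ip : String) : is_valid_ip_address_b ip = is_valid_ip_address ip := by
  unfold is_valid_ip_address is_valid_ip_address_b
  by_cases hlen : PySem.Str.len ip < 7 ∨ PySem.Str.len ip > 15
  · rw [if_pos hlen, if_pos (by omega)]
  · rw [if_neg hlen, if_neg (by omega)]
    by_cases h4 : (PySem.Chars.splitOn ip.toList ['.']).length = 4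
    · rw [if_pos h4, if_neg (by omega)]
      congr 1
      funext o
      cases PySem.Int.ofChars? o with
      | none => rfl
      | some v =>
        by_cases hv : 0 ≤ v ∧ v ≤ 255 <;> simp [hv] <;> omega
    · rw [if_neg h4, if_pos h4]

theorem valid_split (ip : String) (h : is_valid_ip_address ip = true) :
    ∃ a rest y, PySem.Chars.splitOn ip.toList ['.'] = a :: rest ∧
      PySem.Int.ofChars? a = some y ∧ 0 ≤ y ∧ y ≤ 255 := by
  unfold is_valid_ip_address at h
  by_cases hlen : PySem.Str.len ip < 7 ∨ PySem.Str.len ip > 15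
  · rw [if_pos hlen] at h; exact absurd h (by simp)
  · rw [if_neg hlen] at h
    cases hsp : PySem.Chars.splitOn ip.toList ['.'] with
    | nil => rw [hsp] at h; simp at h
    | cons a rest =>
      rw [hsp] at h
      by_cases h4 : (a :: rest).length = 4
      · rw [if_pos h4] at h
        simp only [List.all_cons, Bool.and_eq_true] at h
        obtain ⟨ha, _⟩ := h
        cases hy : PySem.Int.ofChars? a with
        | none => rw [hy] at ha; simp at ha
        | some y =>
          rw [hy] at ha
          simp at ha
          exact ⟨a, rest, y, rfl, hy, by omega, by omega⟩
      · rw [if_neg h4] at h; exact absurd h (by simp)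

theorem net_id_host_id_eq (ip : String) : net_id_host_id ip = net_id_host_id_alt ip := by
  by_cases h : is_valid_ip_address ip = true
  · obtain ⟨a, rest, y, hsp, hy, h0, h255⟩ := valid_split ip h
    unfold net_id_host_id net_id_host_id_alt default_mask class_ip_address
    rw [valid_eq, hsp]
    simp only [h, PySem.List.pyGet?_zero, List.getElem?_cons_zero, hy, not_true,
      if_false]
    by_cases c1 : 1 ≤ y ∧ y ≤ 126
    · simp only [eq_true c1, if_true]; decide
    · by_cases c2 : 128 ≤ y ∧ y ≤ 191
      · simp only [eq_false c1, eq_true c2, if_true, if_false]; decide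
      · by_cases c3 : 192 ≤ y ∧ y ≤ 223
        · simp only [eq_false c1, eq_false c2, eq_true c3, if_true, if_false]; decide
        · by_cases c4 : 224 ≤ y ∧ y ≤ 239
          · simp only [eq_false c1, eq_false c2, eq_false c3, eq_true c4, if_true, if_false]; decide
          · by_cases c5 : 240 ≤ y ∧ y ≤ 255
            · simp only [eq_false c1, eq_false c2, eq_false c3, eq_false c4, eq_true c5, if_true, if_false]; decide
            · simp only [eq_false c1, eq_false c2, eq_false c3, eq_false c4, eq_false c5, if_false]; decide
  · replace h : is_valid_ip_address ip = false := by
      cases hb : is_valid_ip_address ip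
      · rfl
      · exact absurd hb h
    unfold net_id_host_id net_id_host_id_alt
    rw [valid_eq, h]
    rfl

-- ===== VERDICT (by name: the statement is the Claim_ definition above) =====
theorem net_id_host_id_spec : Claim_equal_net_id_host_id := by
  intro ip _
  unfold Spec_net_id_host_id
  exact net_id_host_id_eq ip
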